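-- pv_equiv track=rewrite | github.com/compilepeace/DS_AND_ALGORITHMS | DS_with_python/reccursion/yet_to_be_solved/18_checks.py | check
-- ===== SOURCE A (Python) =====
-- def check(s, si, ei):
--     if si == ei:
--         return True
--
--     if s[0] != 'a':
--         return False
--
--     # If an 'a' is encountered
--     if s[si] == 'a':
--         # If 'a' is followed by a nothing
--         if s[si + 1] == '':
--             return True
--         # If 'a' is followed by an 'a'
--         elif s[si + 1] == 'a':
--             return check(s, si+1, ei)
--
--         # Else 'a' is followed by a 'b'
--         else:
--             # Check if a is followed by 2 b's
--             if si +2 <= ei and s[si + 2] == 'b':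
--                 return check(s, si+1, ei)
--             else:
--                 return False
--
--     # If a 'b' is encountered
--     else:
--         # If 'bb' is encountered
--         if s[si + 1] == 'b':
--             # Is the 'bb' followed by an 'a'
--             if si +2 <= ei and s[si + 2] == 'a':
--                 return check(s, si + 1, ei)
--             # Is the 'bb' followed by a nothing ''
--             elif si +2 <= ei and s[si + 2] == '':
--                 return True
--             else:
--                 return False
--         else:
--             return False
-- ===== SOURCE B (Python) =====
-- def check(s, si, ei):
--     if si == ei:
--         return True
--     if s[0] != 'a':
--         return False
--     while si != ei:
--         c, nxt = s[si], s[si + 1]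
--         if c == 'a':
--             if nxt == '':
--                 return True
--             if nxt != 'a' and not (si + 2 <= ei and s[si + 2] == 'b'):
--                 return False
--         else:
--             if nxt != 'b':
--                 return False
--             if si + 2 <= ei and s[si + 2] == 'a':
--                 pass
--             elif si + 2 <= ei and s[si + 2] == '':
--                 return True
--             else:
--                 return False
--         si += 1
--     return True
-- ===== Notes on version B (the rewrite author's own statement) =====
-- stated objective: alternative
-- what changed: The tail recursion is replaced by an iterative while-loop over a mutable index with the invariant s[0] check hoisted out of the loop and the per-step branches restructured into continue/return form.
-- outside the precondition, e.g. on check(['a', 'b'], 1, 0): A raises IndexError, B raises IndexError; on check(['a', 'a'], -2, 1): A returns True, B returns True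
import Mathlib
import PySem

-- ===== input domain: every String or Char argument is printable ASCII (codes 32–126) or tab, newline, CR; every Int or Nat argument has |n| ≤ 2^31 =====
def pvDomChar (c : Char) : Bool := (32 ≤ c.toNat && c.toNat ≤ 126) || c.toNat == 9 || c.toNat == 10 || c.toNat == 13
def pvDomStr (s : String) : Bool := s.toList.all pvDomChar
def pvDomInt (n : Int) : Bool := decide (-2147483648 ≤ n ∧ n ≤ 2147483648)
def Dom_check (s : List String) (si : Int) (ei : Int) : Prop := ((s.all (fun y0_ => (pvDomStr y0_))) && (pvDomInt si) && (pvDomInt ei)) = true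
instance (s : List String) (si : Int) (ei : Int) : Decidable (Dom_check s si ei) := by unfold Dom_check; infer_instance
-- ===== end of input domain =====

-- B replaces A's tail recursion by an iterative while-loop with the invariant s[0] test hoisted; same value on all of Pre_check.

-- ===== PORT A =====
-- fuel only makes the recursion total; inside Pre_check it is never exhausted
def checkFuel : Nat → List String → Int → Int → Bool
  | 0, _, _, _ => false
  | n+1, s, si, ei =>
    if si = ei then true
    else
      match PySem.List.pyGet? s 0 with
      | none => false
      | some s0 =>
        if s0 ≠ "a" then false
        else
          match PySem.List.pyGet? s si, PySem.List.pyGet? s (si+1) with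
          | some ssi, some ssi1 =>
            if ssi = "a" then
              if ssi1 = "" then true
              else if ssi1 = "a" then checkFuel n s (si+1) ei
              else if si + 2 ≤ ei ∧ PySem.List.pyGet? s (si+2) = some "b" then checkFuel n s (si+1) ei
              else false
            else
              if ssi1 = "b" then
                if si + 2 ≤ ei ∧ PySem.List.pyGet? s (si+2) = some "a" then checkFuel n s (si+1) ei
                else if si + 2 ≤ ei ∧ PySem.List.pyGet? s (si+2) = some "" then true
                else false
              else false
          | _, _ => false

def check (s : List String) (si : Int) (ei : Int) : Bool :=
  checkFuel ((ei - si).toNat + 1) s si ei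

-- ===== PORT B =====
-- the while-loop of Source B; fuel only makes it total, never exhausted inside Pre_check
def altLoop : Nat → List String → Int → Int → Bool
  | n, s, si, ei =>
    if si = ei then true
    else
      match n with
      | 0 => false
      | n+1 =>
        match PySem.List.pyGet? s si, PySem.List.pyGet? s (si+1) with
        | some c, some nxt =>
          if c = "a" then
            if nxt = "" then true
            else if nxt ≠ "a" ∧ ¬ (si + 2 ≤ ei ∧ PySem.List.pyGet? s (si+2) = some "b") then false
            else altLoop n s (si+1) ei
          else
            if nxt ≠ "b" then false
            else if si + 2 ≤ ei ∧ PySem.List.pyGet? s (si+2) = some "a" then altLoop n s (si+1) ei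
            else if si + 2 ≤ ei ∧ PySem.List.pyGet? s (si+2) = some "" then true
            else false
        | _, _ => false

def check_alt (s : List String) (si : Int) (ei : Int) : Bool :=
  if si = ei then true
  else
    match PySem.List.pyGet? s 0 with
    | none => false
    | some s0 =>
      if s0 ≠ "a" then false
      else altLoop (ei - si).toNat s si ei

-- ===== PRECONDITION & SPEC =====
-- Pre_check excludes inputs where A raises (IndexError / unbounded recursion) and the
-- negative-index wraparound cases, where A's value is an accident of Python indexing:
-- it keeps si = ei (immediate True), a first element ≠ 'a' (immediate False), and the
-- natural in-range case 0 ≤ si < ei < len(s).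
def Pre_check (s : List String) (si : Int) (ei : Int) : Prop :=
  si = ei ∨ (s ≠ [] ∧ si ≠ ei ∧ s.headD "" ≠ "a") ∨ (0 ≤ si ∧ si < ei ∧ ei < s.length)
instance (s : List String) (si : Int) (ei : Int) : Decidable (Pre_check s si ei) := by
  unfold Pre_check; infer_instance

def pvWitness_check : List String × Int × Int := (["a", "b", "b", "a"], 0, 3)

def Spec_check (s : List String) (si : Int) (ei : Int) (out : Bool) : Prop := out = check_alt s si ei
instance (s : List String) (si : Int) (ei : Int) (out : Bool) : Decidable (Spec_check s si ei out) := by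
  unfold Spec_check; infer_instance

-- ===== CLAIM (what is proved, stated in full; the proofs are below) =====
def Claim_equal_check : Prop := ∀ (s : List String) (si : Int) (ei : Int), Dom_check s si ei → Pre_check s si ei → Spec_check s si ei (check s si ei)

-- ===== LEMMAS AND PROOFS =====

theorem pyGet?_head {s : List String} (h : s ≠ []) :
    PySem.List.pyGet? s 0 = some (s.headD "") := by
  cases s with
  | nil => simp at h
  | cons a t => simp

theorem altLoop_self (n : Nat) (s : List String) (e : Int) : altLoop n s e e = true := by
  unfold altLoop; simp

-- core correspondence: with s[0] = "a" and si strictly inside range,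
-- one unfolding of A's recursion matches one iteration of B's loop
theorem loop_eq (s : List String) (ei : Int) (hlen : ei < s.length) (h0 : PySem.List.pyGet? s 0 = some "a") :
    ∀ (n : Nat) (si : Int), 0 ≤ si → si < ei → (ei - si).toNat ≤ n →
      checkFuel (n+1) s si ei = altLoop n s si ei := by
  intro n
  induction n with
  | zero => intro si _ h2 h3; omega
  | succ n ih =>
    intro si h1 h2 h3
    have hne : si ≠ ei := by omega
    have hsi := PySem.List.pyGet?_eq_some_getElem (xs := s) (i := si) (by omega) (by omega)
    have hsi1 := PySem.List.pyGet?_eq_some_getElem (xs := s) (i := si + 1) (by omega) (by omega)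
    have hrec : checkFuel (n+1) s (si+1) ei = altLoop n s (si+1) ei := by
      by_cases he : si + 1 = ei
      · subst he; rw [altLoop_self]; unfold checkFuel; simp
      · exact ih (si+1) (by omega) (by omega) (by omega)
    rw [show n + 1 + 1 = (n+1) + 1 from rfl]
    unfold checkFuel altLoop
    rw [hsi, hsi1, h0]
    simp only [if_neg hne, ne_eq, not_true_eq_false, if_false]
    set c := s[si.toNat] with hc_def
    set nxt := s[(si+1).toNat] with hnxt_def
    by_cases hc : c = "a"
    · simp only [if_pos hc]
      by_cases hn0 : nxt = ""
      · simp [hn0]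
      · by_cases hna : nxt = "a"
        · simp [hna, hrec]
        · by_cases hg : si + 2 ≤ ei ∧ PySem.List.pyGet? s (si+2) = some "b"
          · simp [hn0, hna, hg, hrec]
          · simp [hn0, hna, hg]
    · simp only [if_neg hc]
      by_cases hnb : nxt = "b"
      · by_cases hg : si + 2 ≤ ei ∧ PySem.List.pyGet? s (si+2) = some "a"
        · simp [hnb, hg, hrec]
        · by_cases hg2 : si + 2 ≤ ei ∧ PySem.List.pyGet? s (si+2) = some ""
          · simp [hnb, hg2, hrec]
          · simp [hnb, hg2, hrec]
      · simp [hnb]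

-- ===== VERDICT (by name: the statement is the Claim_ definition above) =====
theorem check_spec : Claim_equal_check := by
  intro s si ei _ hpre
  unfold Spec_check
  rcases hpre with h | ⟨hs, hne, hhd⟩ | ⟨h1, h2, h3⟩
  · subst h; simp [check, checkFuel, check_alt]
  · have h0 := pyGet?_head hs
    have hhd' : ¬ (s.head?.getD "" = "a") := by cases s <;> simp_all
    unfold check check_alt checkFuel
    rw [if_neg hne, if_neg hne, h0]
    simp [hhd']
  · have hne : si ≠ ei := by omega
    have hlen : ei < (s.length : Int) := by exact_mod_cast h3
    have hs : s ≠ [] := by cases s <;> simp_all; omega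
    have h0 := pyGet?_head hs
    by_cases hhd : s.headD "" = "a"
    · rw [hhd] at h0
      unfold check check_alt
      rw [if_neg hne, h0]
      simp only [ne_eq, not_true_eq_false, if_false]
      exact loop_eq s ei hlen h0 ((ei - si).toNat) si h1 h2 (le_refl _)
    · have hhd' : ¬ (s.head?.getD "" = "a") := by cases s <;> simp_all
      unfold check check_alt checkFuel
      rw [if_neg hne, if_neg hne, h0]
      simp [hhd']
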